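-- pv_equiv track=rewrite | github.com/samirg1/miscellaneous | uni/FIT1045/combinatorial.py | bounded_lists
-- ===== SOURCE A (Python) =====
-- def bounded_lists(upper_bounds, part=[]):
--     if len(part) == len(upper_bounds):
--         return [part]
--     else:
--         res = []
--         opts = range(0, upper_bounds[len(part)] + 1)
--         for o in opts:
--             aug = part + [o]
--             res += bounded_lists(upper_bounds, aug)
--         return res
-- ===== SOURCE B (Python) =====
-- def bounded_lists(upper_bounds, part=[]):
--     combos = [part]
--     for b in upper_bounds[len(part):]:
--         combos = [c + [o] for c in combos for o in range(b + 1)]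
--     return combos
-- ===== Notes on version B (the rewrite author's own statement) =====
-- stated objective: alternative
-- what changed: B replaces A's one-position-at-a-time recursion with an iterative Cartesian-product build: a single loop over the remaining bounds extends every current prefix by each allowed value, no recursion and no per-call list re-concatenation of results.
import Mathlib
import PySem

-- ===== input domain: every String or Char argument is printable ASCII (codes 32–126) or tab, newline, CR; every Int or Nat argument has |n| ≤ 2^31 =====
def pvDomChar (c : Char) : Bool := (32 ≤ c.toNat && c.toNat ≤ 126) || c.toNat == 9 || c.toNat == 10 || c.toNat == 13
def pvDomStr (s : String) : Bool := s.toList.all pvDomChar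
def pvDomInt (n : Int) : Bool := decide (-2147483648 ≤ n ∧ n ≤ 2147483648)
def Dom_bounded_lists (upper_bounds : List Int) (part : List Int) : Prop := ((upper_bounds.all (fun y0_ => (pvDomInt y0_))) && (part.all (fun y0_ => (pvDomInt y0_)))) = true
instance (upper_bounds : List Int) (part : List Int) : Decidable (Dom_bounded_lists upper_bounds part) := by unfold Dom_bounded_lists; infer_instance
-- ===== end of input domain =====

-- B enumerates the same lists by an iterative Cartesian-product build (extending all prefixes one
-- position per pass) instead of A's per-position recursion (objective: alternative; equivalence is about return values only).

-- ===== PORT A =====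
def bounded_lists (upper_bounds : List Int) (part : List Int) : List (List Int) :=
  if part.length = upper_bounds.length then [part]
  else
    match hg : PySem.List.pyGet? upper_bounds (part.length : Int) with
    | none => []   -- Python raises IndexError here; excluded by Pre_
    | some b =>
      (PySem.List.pyRange 0 (b + 1) 1).foldl
        (fun res o => res ++ bounded_lists upper_bounds (part ++ [o])) []
termination_by upper_bounds.length - part.length
decreasing_by
  rw [PySem.List.pyGet?_natCast] at hg
  obtain ⟨hlt, -⟩ := List.getElem?_eq_some_iff.mp hg
  simp; omega

-- ===== PORT B =====
def bounded_lists_alt (upper_bounds : List Int) (part : List Int) : List (List Int) :=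
  (PySem.List.slice upper_bounds (some (part.length : Int)) none).foldl
    (fun combos b =>
      combos.flatMap (fun c => (PySem.List.pyRange 0 (b + 1) 1).map (fun o => c ++ [o])))
    [part]

-- ===== PRECONDITION & SPEC =====
-- A raises IndexError when part is longer than upper_bounds; it returns on every other input.
def Pre_bounded_lists (upper_bounds : List Int) (part : List Int) : Prop :=
  part.length ≤ upper_bounds.length
instance (upper_bounds : List Int) (part : List Int) : Decidable (Pre_bounded_lists upper_bounds part) := by unfold Pre_bounded_lists; infer_instance
def pvWitness_bounded_lists : List Int × List Int := ([2, 1], [])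

def Spec_bounded_lists (upper_bounds : List Int) (part : List Int) (out : List (List Int)) : Prop := out = bounded_lists_alt upper_bounds part
instance (upper_bounds : List Int) (part : List Int) (out : List (List Int)) : Decidable (Spec_bounded_lists upper_bounds part out) := by unfold Spec_bounded_lists; infer_instance

-- ===== CLAIM (what is proved, stated in full; the proofs are below) =====
def Claim_equal_bounded_lists : Prop := ∀ (upper_bounds : List Int) (part : List Int), Dom_bounded_lists upper_bounds part → Pre_bounded_lists upper_bounds part → Spec_bounded_lists upper_bounds part (bounded_lists upper_bounds part)

-- ===== LEMMAS AND PROOFS =====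

/-- The Cartesian product of the down-ranges of `bs`, leftmost most significant. -/
def pvProd (bs : List Int) : List (List Int) :=
  match bs with
  | [] => [[]]
  | b :: rest => (PySem.List.pyRange 0 (b + 1) 1).flatMap (fun o => (pvProd rest).map (fun c => o :: c))

lemma pvProd_foldl (bs : List Int) :
    ∀ accs : List (List Int),
      bs.foldl (fun combos b => combos.flatMap (fun c => (PySem.List.pyRange 0 (b + 1) 1).map (fun o => c ++ [o]))) accs
        = accs.flatMap (fun p => (pvProd bs).map (fun c => p ++ c)) := by
  induction bs with
  | nil => intro accs; simp [pvProd]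
  | cons b rest ih =>
    intro accs
    rw [List.foldl_cons, ih]
    simp [pvProd, List.map_flatMap, List.flatMap_assoc, List.flatMap_map, List.map_map,
      Function.comp_def]

lemma bounded_lists_eq_prod (ub : List Int) :
    ∀ (n : Nat) (part : List Int), ub.length - part.length = n → part.length ≤ ub.length →
      bounded_lists ub part = (pvProd (ub.drop part.length)).map (fun c => part ++ c) := by
  intro n
  induction n with
  | zero =>
    intro part h hle
    have heq : part.length = ub.length := by omega
    rw [bounded_lists, if_pos heq, heq, List.drop_length]
    simp [pvProd]
  | succ n ih =>
    intro part h hle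
    have hlt : part.length < ub.length := by omega
    rw [bounded_lists, if_neg (by omega)]
    have hget : PySem.List.pyGet? ub (part.length : Int) = some ub[part.length] := by
      rw [PySem.List.pyGet?_natCast]; exact List.getElem?_eq_getElem hlt
    split
    case _ hg => rw [hget] at hg; cases hg
    case _ b hg =>
      rw [hget] at hg
      obtain rfl : b = ub[part.length] := (Option.some_inj.mp hg).symm
      rw [PySem.List.foldl_append_eq_flatMap, List.nil_append]
      have hfun : (fun o => bounded_lists ub (part ++ [o]))
          = fun o => (pvProd (ub.drop (part.length + 1))).map (fun c => (part ++ [o]) ++ c) := by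
        funext o
        have := ih (part ++ [o]) (by simp; omega) (by simp; omega)
        simpa using this
      rw [hfun, List.drop_eq_getElem_cons hlt, pvProd]
      simp [List.map_flatMap, Function.comp_def]

lemma bounded_lists_alt_eq_prod (ub part : List Int) :
    bounded_lists_alt ub part = (pvProd (ub.drop part.length)).map (fun c => part ++ c) := by
  unfold bounded_lists_alt
  rw [PySem.List.slice_from_natCast, pvProd_foldl]
  simp

-- ===== VERDICT (by name: the statement is the Claim_ definition above) =====
theorem bounded_lists_spec : Claim_equal_bounded_lists := by
  intro ub part _ hpre
  unfold Spec_bounded_lists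
  rw [bounded_lists_eq_prod ub (ub.length - part.length) part rfl hpre,
    bounded_lists_alt_eq_prod]
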